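-- pv_equiv track=rewrite | github.com/SwomeeSwann/KU-Comp | user_input.py | translate_dates
-- ===== SOURCE A (Python) =====
-- def translate_dates(datestring, start_date, end_date):
--     for words in range(len(datestring)):
--         word = datestring[words]
--         if word == 'day' and start_date == None:
--            start_date = datestring[words+1]
--         elif word.isalpha() == False and start_date == None:
--             start_date = word
--         elif word == 'day':
--             end_date = datestring[words+1]
--         elif word.isalpha() == False:
--               end_date = word
--     return(start_date, end_date)
-- ===== SOURCE B (Python) =====
-- def translate_dates(datestring, start_date, end_date):
--     # Two-pass: first collect the date-candidate tokens, then assign start/end.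
--     candidates = []
--     for i, tok in enumerate(datestring):
--         if tok == 'day':
--             candidates.append(datestring[i + 1])
--         elif not tok.isalpha():
--             candidates.append(tok)
--     if start_date is None and candidates:
--         start_date = candidates[0]
--         remaining = candidates[1:]
--     else:
--         remaining = candidates
--     if remaining:
--         end_date = remaining[-1]
--     return (start_date, end_date)
-- ===== Notes on version B (the rewrite author's own statement) =====
-- stated objective: alternative
-- what changed: Replaces A's inline four-branch state update during the index scan by a two-pass decomposition: first collect all date-candidate tokens into a list, then assign start_date from its head (if unset) and end_date from the last remaining candidate.
import Mathlib
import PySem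

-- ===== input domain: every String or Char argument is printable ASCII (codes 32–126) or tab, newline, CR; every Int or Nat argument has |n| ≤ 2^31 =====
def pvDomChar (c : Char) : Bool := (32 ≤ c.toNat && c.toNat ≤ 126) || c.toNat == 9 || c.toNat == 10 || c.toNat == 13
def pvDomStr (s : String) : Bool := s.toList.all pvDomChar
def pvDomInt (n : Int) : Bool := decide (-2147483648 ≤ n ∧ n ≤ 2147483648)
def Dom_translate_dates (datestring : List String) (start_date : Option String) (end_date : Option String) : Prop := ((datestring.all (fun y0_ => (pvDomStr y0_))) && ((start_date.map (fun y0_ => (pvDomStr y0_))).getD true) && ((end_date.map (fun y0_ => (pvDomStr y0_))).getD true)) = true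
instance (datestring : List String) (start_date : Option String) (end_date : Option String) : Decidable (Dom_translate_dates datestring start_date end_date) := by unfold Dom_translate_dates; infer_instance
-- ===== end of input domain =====

-- B collects the candidate date tokens in a first pass, then assigns start/end in a second step;
-- return-value equivalence only (no observable mutation in either program).

-- ===== PORT A =====
-- one loop iteration of A; the Option threads the possible IndexError of datestring[words+1]
def aStep (datestring : List String) (st : Option (Option String × Option String)) (words : Int) :
    Option (Option String × Option String) :=
  match st with
  | none => none
  | some (s, e) =>
    match PySem.List.pyGet? datestring words with
    | none => none
    | some word =>
      if word = "day" ∧ s = none then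
        (PySem.List.pyGet? datestring (words + 1)).map (fun w => (some w, e))
      else if PySem.Str.strIsalpha word = false ∧ s = none then
        some (some word, e)
      else if word = "day" then
        (PySem.List.pyGet? datestring (words + 1)).map (fun w => (s, some w))
      else if PySem.Str.strIsalpha word = false then
        some (s, some word)
      else
        some (s, e)

def translate_dates (datestring : List String) (start_date : Option String) (end_date : Option String) :
    Option String × Option String :=
  ((PySem.List.pyRange 0 (PySem.List.len datestring) 1).foldl (aStep datestring)
      (some (start_date, end_date))).getD (start_date, end_date)

-- ===== PORT B =====
-- first pass of B: build the candidates list (Option threads the IndexError of datestring[i+1])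
def bStep (datestring : List String) (acc : Option (List String)) (p : Int × String) :
    Option (List String) :=
  match acc with
  | none => none
  | some cs =>
    if p.2 = "day" then (PySem.List.pyGet? datestring (p.1 + 1)).map (fun w => cs ++ [w])
    else if PySem.Str.strIsalpha p.2 = false then some (cs ++ [p.2])
    else some cs

def translate_dates_alt (datestring : List String) (start_date : Option String) (end_date : Option String) :
    Option String × Option String :=
  match (PySem.List.enumerate datestring 0).foldl (bStep datestring) (some []) with
  | none => (start_date, end_date)
  | some candidates =>
    let (s', remaining) :=
      match start_date, candidates with
      | none, c :: rest => (some c, rest)        -- candidates[0], candidates[1:]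
      | _, _ => (start_date, candidates)
    match remaining with
    | [] => (s', end_date)
    | _ => (s', PySem.List.pyGet? remaining (-1))  -- remaining[-1]

-- ===== PRECONDITION & SPEC =====
-- Pre_ excludes exactly the inputs on which Python A raises IndexError: a datestring whose LAST token is 'day'
-- (then datestring[words+1] is read past the end); B raises there too.
def Pre_translate_dates (datestring : List String) (start_date : Option String) (end_date : Option String) : Prop :=
  datestring.getLast? ≠ some "day"
instance (datestring : List String) (start_date : Option String) (end_date : Option String) : Decidable (Pre_translate_dates datestring start_date end_date) := by unfold Pre_translate_dates; infer_instance

def pvWitness_translate_dates : List String × Option String × Option String :=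
  (["from", "day", "5", "to", "7"], none, none)

def Spec_translate_dates (datestring : List String) (start_date : Option String) (end_date : Option String) (out : Option String × Option String) : Prop := out = translate_dates_alt datestring start_date end_date
instance (datestring : List String) (start_date : Option String) (end_date : Option String) (out : Option String × Option String) : Decidable (Spec_translate_dates datestring start_date end_date out) := by unfold Spec_translate_dates; infer_instance

-- ===== CLAIM (what is proved, stated in full; the proofs are below) =====
def Claim_equal_translate_dates : Prop := ∀ (datestring : List String) (start_date : Option String) (end_date : Option String), Dom_translate_dates datestring start_date end_date → Pre_translate_dates datestring start_date end_date → Spec_translate_dates datestring start_date end_date (translate_dates datestring start_date end_date)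

-- ===== LEMMAS AND PROOFS =====

-- the A-side step after the in-range lookup of 'word' has been resolved to the enumerate pair
def aStep' (datestring : List String) (st : Option (Option String × Option String)) (p : Int × String) :
    Option (Option String × Option String) :=
  match st with
  | none => none
  | some (s, e) =>
    if p.2 = "day" ∧ s = none then
      (PySem.List.pyGet? datestring (p.1 + 1)).map (fun w => (some w, e))
    else if PySem.Str.strIsalpha p.2 = false ∧ s = none then
      some (some p.2, e)
    else if p.2 = "day" then
      (PySem.List.pyGet? datestring (p.1 + 1)).map (fun w => (s, some w))
    else if PySem.Str.strIsalpha p.2 = false then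
      some (s, some p.2)
    else
      some (s, e)

-- applying one collected candidate to A's (start, end) state
def applyCand (st : Option String × Option String) (c : String) : Option String × Option String :=
  match st with
  | (none, e) => (some c, e)
  | (some s, _) => (some s, some c)

theorem aStep'_none (ds : List String) (l : List (Int × String)) :
    l.foldl (aStep' ds) none = none := by
  induction l with
  | nil => rfl
  | cons p l ih => simpa [aStep'] using ih

theorem bStep_none (ds : List String) (l : List (Int × String)) :
    l.foldl (bStep ds) none = none := by
  induction l with
  | nil => rfl
  | cons p l ih => simpa [bStep] using ih

theorem bStep_shift (ds : List String) (l : List (Int × String)) :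
    ∀ cs0 : List String,
      l.foldl (bStep ds) (some cs0) = (l.foldl (bStep ds) (some [])).map (cs0 ++ ·) := by
  induction l with
  | nil => intro cs0; simp
  | cons p l ih =>
    intro cs0
    simp only [List.foldl_cons, bStep]
    by_cases hd : p.2 = "day"
    · cases hw : PySem.List.pyGet? ds (p.1 + 1) with
      | none => simp [hd, bStep_none]
      | some w =>
        simp only [if_pos hd, Option.map_some, List.nil_append]
        rw [ih (cs0 ++ [w]), ih [w]]
        cases l.foldl (bStep ds) (some []) <;> simp
    · by_cases ha : PySem.Str.strIsalpha p.2 = false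
      · simp only [if_neg hd, if_pos ha, List.nil_append]
        rw [ih (cs0 ++ [p.2]), ih [p.2]]
        cases l.foldl (bStep ds) (some []) <;> simp
      · simp only [if_neg hd, if_neg ha]
        exact ih cs0

-- main invariant: A's loop equals collecting B's candidates and folding them into the state
theorem key (ds : List String) (l : List (Int × String)) :
    ∀ s e, l.foldl (aStep' ds) (some (s, e)) =
      (l.foldl (bStep ds) (some [])).map (fun cs => cs.foldl applyCand (s, e)) := by
  induction l with
  | nil => intro s e; rfl
  | cons p l ih =>
    intro s e
    have step : ∀ (c : String),
        l.foldl (aStep' ds) (some (applyCand (s, e) c)) =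
          (l.foldl (bStep ds) (some [c])).map (fun cs => cs.foldl applyCand (s, e)) := by
      intro c
      rw [bStep_shift, ih]
      cases l.foldl (bStep ds) (some []) <;> simp [List.foldl_cons]
    by_cases hd : p.2 = "day"
    · cases hw : PySem.List.pyGet? ds (p.1 + 1) with
      | none =>
        cases s <;>
          simp [List.foldl_cons, aStep', bStep, hd, hw, aStep'_none, bStep_none]
      | some w =>
        cases s with
        | none =>
          simpa [List.foldl_cons, aStep', bStep, hd, hw, applyCand] using step w
        | some s0 =>
          simpa [List.foldl_cons, aStep', bStep, hd, hw, applyCand] using step w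
    · by_cases ha : PySem.Str.strIsalpha p.2 = false
      · have ha' : PySem.Chars.strIsalpha p.2.toList = false := by simpa using ha
        cases s with
        | none =>
          simpa [List.foldl_cons, aStep', bStep, hd, ha', applyCand] using step p.2
        | some s0 =>
          simpa [List.foldl_cons, aStep', bStep, hd, ha', applyCand] using step p.2
      · cases s <;> simp only [List.foldl_cons, aStep', bStep, hd, ha] <;>
          simp [ih]

theorem applyCand_some (cs : List String) :
    ∀ (s0 : String) (e : Option String),
      cs.foldl applyCand (some s0, e) =
        (some s0, match cs.getLast? with | none => e | some c => some c) := by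
  induction cs with
  | nil => intro s0 e; rfl
  | cons c cs ih =>
    intro s0 e
    rw [List.foldl_cons]
    show cs.foldl applyCand (some s0, some c) = _
    rw [ih s0 (some c)]
    cases h : cs.getLast? with
    | none =>
      have : cs = [] := List.getLast?_eq_none_iff.mp h
      subst this; simp
    | some d => simp [List.getLast?_cons, h]

-- folding the candidates equals B's head/tail assignment step
theorem applyCand_eq_assign (cs : List String) (s e : Option String) :
    cs.foldl applyCand (s, e) =
      (match s, cs with
       | none, c :: rest => (some c,
           match rest with | [] => e | _ => PySem.List.pyGet? rest (-1))
       | _, _ => (s, match cs with | [] => e | _ => PySem.List.pyGet? cs (-1))) := by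
  cases s with
  | some s0 =>
    rw [applyCand_some]
    cases hc : cs.getLast? with
    | none =>
      have : cs = [] := List.getLast?_eq_none_iff.mp hc
      subst this; rfl
    | some c =>
      have hne : cs ≠ [] := by intro h; subst h; simp at hc
      cases cs with
      | nil => simp at hc
      | cons a as => simp [PySem.List.pyGet?_neg_one, hc]
  | none =>
    cases cs with
    | nil => rfl
    | cons c rest =>
      rw [List.foldl_cons]
      show rest.foldl applyCand (some c, e) = _
      rw [applyCand_some]
      cases hr : rest.getLast? with
      | none =>
        have : rest = [] := List.getLast?_eq_none_iff.mp hr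
        subst this; rfl
      | some d =>
        have : rest ≠ [] := by intro h; subst h; simp at hr
        cases rest with
        | nil => simp at hr
        | cons a as => simp [PySem.List.pyGet?_neg_one, hr]

-- A's indexed scan, rewritten as a scan of the enumerate pairs
theorem aFold_eq (ds : List String) (s e : Option String) :
    (PySem.List.pyRange 0 (PySem.List.len ds) 1).foldl (aStep ds) (some (s, e)) =
      (PySem.List.enumerate ds 0).foldl (aStep' ds) (some (s, e)) := by
  have hrange : PySem.List.pyRange 0 (PySem.List.len ds) 1 =
      (PySem.List.enumerate ds 0).map (·.1) := by
    rw [PySem.List.map_fst_enumerate]; simp [PySem.List.len_eq]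
  rw [hrange, List.foldl_map]
  apply PySem.List.foldl_congr_mem
  intro acc p hp
  rw [PySem.List.mem_enumerate_iff] at hp
  obtain ⟨k, hk, hpk⟩ := hp
  subst hpk
  have hget : PySem.List.pyGet? ds ((0 : Int) + k) = some ds[k] := by
    simp [hk]
  simp only [aStep, aStep', hget]

theorem translate_dates_spec' (ds : List String) (s e : Option String) :
    translate_dates ds s e = translate_dates_alt ds s e := by
  unfold translate_dates translate_dates_alt
  rw [aFold_eq, key]
  cases h : (PySem.List.enumerate ds 0).foldl (bStep ds) (some []) with
  | none => rfl
  | some cs =>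
    simp only [Option.map_some, Option.getD_some]
    rw [applyCand_eq_assign]
    cases s with
    | some s0 => cases cs <;> rfl
    | none =>
      cases cs with
      | nil => rfl
      | cons c rest => cases rest <;> rfl

-- ===== VERDICT (by name: the statement is the Claim_ definition above) =====
theorem translate_dates_spec : Claim_equal_translate_dates := by
  intro ds s e _ _
  exact translate_dates_spec' ds s e
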